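-- pv_equiv track=rewrite | github.com/GabeDO/ElephantProject | scripts/SNPs_CheckIfSynonymous.py | CanItFit
-- ===== SOURCE A (Python) =====
-- def CanItFit(Seq):
--     #set up some lists for later
--     PermList = []
--     UnKnownPos =[]
--     NList = ['A','T','C','G']
--
--     #loop through the sequence positions
--     for i in range(len(Seq)):
--         #if theres a missing value, append that position to a list of positions
--         if Seq[i] == 'N':
--             UnKnownPos.append(i)
--
--     #if theres only a single missing value, just loop through ass possibilities and add em to a list
--     if len(UnKnownPos) == 1:
--         for i in range(len(NList)):
--             Seq1 = Seq[:UnKnownPos[0]] + NList[i] + Seq[UnKnownPos[0] + 1:]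
--             PermList.append(Seq1)
--
--     #same thing for if theres two, but nested loop it, so it gets all possible permutaions.
--     if len(UnKnownPos) == 2:
--         for i in range(len(NList)):
--             Seq1 = Seq[:UnKnownPos[0]] + NList[i] + Seq[UnKnownPos[0] + 1:]
--             for k in range(len(NList)):
--                 Seq2 = Seq1[:UnKnownPos[1]] + NList[k] + Seq1[UnKnownPos[1] + 1:]
--
--                 PermList.append(Seq2)
--
--     #return a list of all possibilities
--     return PermList
-- ===== SOURCE B (Python) =====
-- def CanItFit(Seq):
--     # General product-based rebuild: collect N positions, expand letter
--     # combinations breadth-first, and write letters into a char list.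
--     positions = [i for i, c in enumerate(Seq) if c == 'N']
--     if len(positions) not in (1, 2):
--         return []
--     combos = [[]]
--     for _ in positions:
--         combos = [combo + [letter] for combo in combos for letter in 'ATCG']
--     return [''.join(_assign(Seq, positions, combo)) for combo in combos]
--
--
-- def _assign(Seq, positions, combo):
--     chars = list(Seq)
--     for pos, letter in zip(positions, combo):
--         chars[pos] = letter
--     return chars
-- ===== Notes on version B (the rewrite author's own statement) =====
-- stated objective: alternative
-- what changed: Replaces A's two hard-coded branches (single loop with slicing for one N, nested loops with double slicing for two N) by one general product-style expansion: collect N positions, grow the letter-combination list once per position, then write each combination into a char-list copy of Seq.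
import Mathlib
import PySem

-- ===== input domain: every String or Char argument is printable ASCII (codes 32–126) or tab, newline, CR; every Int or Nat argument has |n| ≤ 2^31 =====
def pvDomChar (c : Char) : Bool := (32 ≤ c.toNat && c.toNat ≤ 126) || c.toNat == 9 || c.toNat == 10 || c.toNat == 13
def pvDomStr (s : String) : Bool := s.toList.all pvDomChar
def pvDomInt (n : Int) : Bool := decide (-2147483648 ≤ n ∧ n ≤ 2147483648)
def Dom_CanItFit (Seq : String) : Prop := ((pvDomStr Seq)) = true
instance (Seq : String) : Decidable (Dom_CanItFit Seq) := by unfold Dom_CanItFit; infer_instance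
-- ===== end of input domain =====

-- B replaces A's hard-coded one-N/two-N slicing branches with one general
-- product-style expansion over the N positions plus in-place char assignment (objective: alternative decomposition).

-- ===== PORT A =====
def CanItFit (Seq : String) : List String :=
  let PermList : List String := []
  let UnKnownPos : List Int := []
  let NList : List Char := ['A', 'T', 'C', 'G']
  -- for i in range(len(Seq)): if Seq[i] == 'N': UnKnownPos.append(i)
  let UnKnownPos := (PySem.List.pyRange 0 (PySem.Str.len Seq) 1).foldl
    (fun acc i => if PySem.List.pyGetD Seq.toList i ' ' = 'N' then acc ++ [i] else acc) UnKnownPos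
  let PermList :=
    if UnKnownPos.length = 1 then
      (PySem.List.pyRange 0 (NList.length : Int) 1).foldl
        (fun acc i =>
          let Seq1 := PySem.List.slice Seq.toList none (some (PySem.List.pyGetD UnKnownPos 0 0)) ++
                      [PySem.List.pyGetD NList i ' '] ++
                      PySem.List.slice Seq.toList (some (PySem.List.pyGetD UnKnownPos 0 0 + 1)) none
          acc ++ [String.ofList Seq1]) PermList
    else PermList
  let PermList :=
    if UnKnownPos.length = 2 then
      (PySem.List.pyRange 0 (NList.length : Int) 1).foldl
        (fun acc i =>
          let Seq1 := PySem.List.slice Seq.toList none (some (PySem.List.pyGetD UnKnownPos 0 0)) ++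
                      [PySem.List.pyGetD NList i ' '] ++
                      PySem.List.slice Seq.toList (some (PySem.List.pyGetD UnKnownPos 0 0 + 1)) none
          (PySem.List.pyRange 0 (NList.length : Int) 1).foldl
            (fun acc2 k =>
              let Seq2 := PySem.List.slice Seq1 none (some (PySem.List.pyGetD UnKnownPos 1 0)) ++
                          [PySem.List.pyGetD NList k ' '] ++
                          PySem.List.slice Seq1 (some (PySem.List.pyGetD UnKnownPos 1 0 + 1)) none
              acc2 ++ [String.ofList Seq2]) acc) PermList
    else PermList
  PermList

-- ===== PORT B =====
-- chars = list(Seq); for pos, letter in zip(positions, combo): chars[pos] = letter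
def pvAssign (cs : List Char) (positions : List Int) (combo : List Char) : List Char :=
  (positions.zip combo).foldl (fun chars pl => PySem.List.pySetD chars pl.1 pl.2) cs

def CanItFit_alt (Seq : String) : List String :=
  let positions : List Int :=
    ((PySem.List.enumerate Seq.toList 0).filter (fun p => p.2 == 'N')).map (·.1)
  if positions.length = 1 ∨ positions.length = 2 then
    let combos := positions.foldl
      (fun combos _ => combos.flatMap
        (fun combo => ['A', 'T', 'C', 'G'].map (fun letter => combo ++ [letter]))) [[]]
    combos.map (fun combo => String.ofList (pvAssign Seq.toList positions combo))
  else []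

-- ===== PRECONDITION & SPEC =====
def Spec_CanItFit (Seq : String) (out : List String) : Prop := out = CanItFit_alt Seq
instance (Seq : String) (out : List String) : Decidable (Spec_CanItFit Seq out) := by unfold Spec_CanItFit; infer_instance

-- ===== CLAIM (what is proved, stated in full; the proofs are below) =====
def Claim_equal_CanItFit : Prop := ∀ (Seq : String), Dom_CanItFit Seq → Spec_CanItFit Seq (CanItFit Seq)

-- ===== LEMMAS AND PROOFS =====

-- canonical list of the (absolute) indices of 'N' in cs, starting at offset a
def nIdxFrom (a : Int) : List Char → List Int
  | [] => []
  | c :: cs => if c = 'N' then a :: nIdxFrom (a + 1) cs else nIdxFrom (a + 1) cs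

lemma mem_nIdxFrom {p a : Int} {cs : List Char} (h : p ∈ nIdxFrom a cs) :
    a ≤ p ∧ p < a + cs.length := by
  induction cs generalizing a with
  | nil => simp [nIdxFrom] at h
  | cons c cs ih =>
    simp only [nIdxFrom] at h
    split at h
    · rcases List.mem_cons.1 h with rfl | h
      · simp only [List.length_cons]; push_cast; omega
      · have := ih h; simp at this ⊢; omega
    · have := ih h; simp at this ⊢; omega

lemma pyGetD_cons_pos (c : Char) (cs : List Char) (i : Int) (h : 1 ≤ i)
    (h2 : i ≤ (cs.length : Int)) (d : Char) :
    PySem.List.pyGetD (c :: cs) i d = PySem.List.pyGetD cs (i - 1) d := by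
  simp only [PySem.List.pyGetD, PySem.List.pyGet?, PySem.List.pyIdx?, List.length_cons]
  rw [if_pos (show (0:Int) ≤ i by omega), if_pos (by push_cast; omega),
    if_pos (show (0:Int) ≤ i - 1 by omega), if_pos (by omega)]
  obtain ⟨n, hn⟩ : ∃ n, i.toNat = n + 1 := ⟨i.toNat - 1, by omega⟩
  simp [hn, show (i - 1).toNat = n by omega]

lemma A_loop (cs : List Char) (a : Int) (acc : List Int) :
    (PySem.List.pyRange a (a + cs.length) 1).foldl
      (fun acc i => if PySem.List.pyGetD cs (i - a) ' ' = 'N' then acc ++ [i] else acc) acc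
    = acc ++ nIdxFrom a cs := by
  induction cs generalizing a acc with
  | nil => simp [PySem.List.pyRange_one_eq_nil, nIdxFrom]
  | cons c cs ih =>
    rw [PySem.List.pyRange_one_cons (by simp)]
    simp only [List.foldl_cons, sub_self, PySem.List.pyGetD_zero_cons]
    have hcong : ∀ (acc' : List Int),
        (PySem.List.pyRange (a + 1) (a + (c :: cs).length) 1).foldl
          (fun acc i => if PySem.List.pyGetD (c :: cs) (i - a) ' ' = 'N' then acc ++ [i] else acc) acc'
        = (PySem.List.pyRange (a + 1) (a + 1 + cs.length) 1).foldl
          (fun acc i => if PySem.List.pyGetD cs (i - (a + 1)) ' ' = 'N' then acc ++ [i] else acc) acc' := by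
      intro acc'
      have hr : PySem.List.pyRange (a + 1) (a + (c :: cs).length) 1
          = PySem.List.pyRange (a + 1) (a + 1 + cs.length) 1 := by
        congr 1; simp; omega
      rw [hr]
      refine PySem.List.foldl_congr_mem _ _ _ _ ?_
      intro acc2 x hx
      rw [PySem.List.mem_pyRange_one] at hx
      rw [pyGetD_cons_pos c cs (x - a) (by omega) (by omega) ' ']
      have : x - a - 1 = x - (a + 1) := by ring
      rw [this]
    split
    · rw [hcong, ih]; simp [nIdxFrom, *]
    · rw [hcong, ih]; simp [nIdxFrom, *]

lemma A_loop0 (cs : List Char) :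
    (PySem.List.pyRange 0 (cs.length : Int) 1).foldl
      (fun acc i => if PySem.List.pyGetD cs i ' ' = 'N' then acc ++ [i] else acc) []
    = nIdxFrom 0 cs := by
  have h := A_loop cs 0 []
  simp only [zero_add, sub_zero] at h
  simpa using h

lemma B_pos (cs : List Char) (a : Int) :
    ((PySem.List.enumerate cs a).filter (fun p => p.2 == 'N')).map (·.1) = nIdxFrom a cs := by
  induction cs generalizing a with
  | nil => simp [PySem.List.enumerate_nil, nIdxFrom]
  | cons c cs ih =>
    rw [PySem.List.enumerate_cons]
    by_cases h : c = 'N' <;> simp [nIdxFrom, h, ih]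

lemma splice_eq_set (cs : List Char) (p : Int) (c : Char)
    (h0 : 0 ≤ p) (h1 : p < (cs.length : Int)) :
    PySem.List.slice cs none (some p) ++ [c] ++ PySem.List.slice cs (some (p + 1)) none
    = cs.set p.toNat c := by
  rw [PySem.List.slice_to cs h0, PySem.List.slice_from cs (show (0:Int) ≤ p + 1 by omega)]
  have h2 : (p + 1).toNat = p.toNat + 1 := by omega
  rw [h2, List.append_assoc, List.singleton_append,
    ← List.set_eq_take_cons_drop c (show p.toNat < cs.length by omega)]

lemma pySetD_eq_set (cs : List Char) (p : Int) (c : Char) (h0 : 0 ≤ p) :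
    PySem.List.pySetD cs p c = cs.set p.toNat c :=
  PySem.List.pySetD_of_nonneg cs c h0

lemma splice2 (cs : List Char) (m : Nat) (d : Char) (p : Int) (c : Char)
    (h0 : 0 ≤ p) (h1 : p < (cs.length : Int)) :
    PySem.List.slice (cs.set m d) none (some p) ++ [c] ++ PySem.List.slice (cs.set m d) (some (p + 1)) none
    = (cs.set m d).set p.toNat c :=
  splice_eq_set _ p c h0 (by simpa using h1)

-- ===== VERDICT (by name: the statement is the Claim_ definition above) =====
theorem CanItFit_spec : Claim_equal_CanItFit := by
  intro Seq _
  show CanItFit Seq = CanItFit_alt Seq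
  have hmem : ∀ p ∈ nIdxFrom 0 Seq.toList, 0 ≤ p ∧ p < (Seq.toList.length : Int) := by
    intro p hp
    have := mem_nIdxFrom hp
    omega
  simp only [CanItFit, CanItFit_alt, PySem.Str.len_eq, A_loop0, B_pos]
  have hr4 : PySem.List.pyRange 0 (([('A':Char),'T','C','G']).length : Int) 1 = [0, 1, 2, 3] := by decide
  rcases hP : nIdxFrom 0 Seq.toList with _ | ⟨p0, _ | ⟨p1, _ | ⟨p2, rest⟩⟩⟩
  · simp
  · obtain ⟨h0, h1⟩ := hmem p0 (by rw [hP]; simp)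
    rw [if_neg (show ¬([p0] : List Int).length = 2 by simp),
      if_pos (show ([p0] : List Int).length = 1 from rfl),
      if_pos (show ([p0] : List Int).length = 1 ∨ ([p0] : List Int).length = 2 from Or.inl rfl)]
    simp only [hr4, List.foldl_cons, List.foldl_nil,
      PySem.List.pyGetD_zero_cons,
      show PySem.List.pyGetD ['A','T','C','G'] 0 ' ' = 'A' from rfl,
      show PySem.List.pyGetD ['A','T','C','G'] 1 ' ' = 'T' from rfl,
      show PySem.List.pyGetD ['A','T','C','G'] 2 ' ' = 'C' from rfl,
      show PySem.List.pyGetD ['A','T','C','G'] 3 ' ' = 'G' from rfl]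
    rw [splice_eq_set Seq.toList p0 'A' h0 h1, splice_eq_set Seq.toList p0 'T' h0 h1,
      splice_eq_set Seq.toList p0 'C' h0 h1, splice_eq_set Seq.toList p0 'G' h0 h1]
    simp only [pvAssign, List.flatMap_cons, List.flatMap_nil, List.map_cons, List.map_nil,
      List.zip, List.zipWith, List.foldl_cons, List.foldl_nil, List.nil_append, List.append_nil]
    rw [pySetD_eq_set Seq.toList p0 'A' h0, pySetD_eq_set Seq.toList p0 'T' h0,
      pySetD_eq_set Seq.toList p0 'C' h0, pySetD_eq_set Seq.toList p0 'G' h0]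
    rfl
  · obtain ⟨h00, h01⟩ := hmem p0 (by rw [hP]; simp)
    obtain ⟨h10, h11⟩ := hmem p1 (by rw [hP]; simp)
    rw [if_pos (show ([p0, p1] : List Int).length = 2 from rfl),
      if_neg (show ¬([p0, p1] : List Int).length = 1 by simp),
      if_pos (show ([p0, p1] : List Int).length = 1 ∨ ([p0, p1] : List Int).length = 2 from Or.inr rfl)]
    simp only [hr4, List.foldl_cons, List.foldl_nil,
      PySem.List.pyGetD_zero_cons,
      show PySem.List.pyGetD [p0, p1] 1 0 = p1 from rfl,
      show PySem.List.pyGetD ['A','T','C','G'] 0 ' ' = 'A' from rfl,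
      show PySem.List.pyGetD ['A','T','C','G'] 1 ' ' = 'T' from rfl,
      show PySem.List.pyGetD ['A','T','C','G'] 2 ' ' = 'C' from rfl,
      show PySem.List.pyGetD ['A','T','C','G'] 3 ' ' = 'G' from rfl]
    simp only [fun c => splice_eq_set Seq.toList p0 c h00 h01]
    simp only [fun m d c => splice2 Seq.toList m d p1 c h10 h11]
    simp only [pvAssign, List.flatMap_cons, List.flatMap_nil, List.map_cons, List.map_nil,
      List.cons_append, List.zip_cons_cons, List.zip_nil_right,
      List.foldl_cons, List.foldl_nil, List.nil_append, List.append_nil]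
    simp only [fun c => pySetD_eq_set Seq.toList p0 c h00]
    simp only [fun cs c => pySetD_eq_set cs p1 c h10]
  · simp
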